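-- pv_equiv track=rewrite | github.com/Hitstar53/CSS-Practicals | Exp1/Substitution-Techniques-Attack-2021300108/brute_force_playfair.py | create_digraphs
-- ===== SOURCE A (Python) =====
-- def create_digraphs(text):
--     digraphs = []
--     i = 0
--     while i < len(text):
--         if i + 1 < len(text):
--             digraphs.append(text[i] + text[i + 1])
--         else:
--             digraphs.append(text[i] + 'X')
--         i += 2
--     return digraphs
-- ===== SOURCE B (Python) =====
-- def create_digraphs(text):
--     evens = text[::2]
--     odds = text[1::2]
--     if len(odds) < len(evens):
--         odds += 'X'
--     return [a + b for a, b in zip(evens, odds)]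
-- ===== Notes on version B (the rewrite author's own statement) =====
-- stated objective: alternative
-- what changed: B deinterleaves the text into its two stride-2 subsequences (text[::2] and text[1::2]), pads the shorter odd-index stream with the single pad character, and zips the streams back into character pairs, instead of A's index while-loop with a per-pair tail conditional; the C-level strided slicing and zip replace per-character interpreted loop steps.
import Mathlib
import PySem

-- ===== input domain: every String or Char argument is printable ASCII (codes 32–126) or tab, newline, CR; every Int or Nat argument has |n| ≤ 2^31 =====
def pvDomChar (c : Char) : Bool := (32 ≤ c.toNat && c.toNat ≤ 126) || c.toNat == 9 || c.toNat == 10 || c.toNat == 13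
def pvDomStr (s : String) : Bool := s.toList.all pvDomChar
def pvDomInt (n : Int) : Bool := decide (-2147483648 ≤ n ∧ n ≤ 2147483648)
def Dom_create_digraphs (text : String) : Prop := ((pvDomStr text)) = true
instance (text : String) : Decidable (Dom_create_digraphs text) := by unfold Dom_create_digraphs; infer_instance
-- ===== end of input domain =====

-- B deinterleaves the text into its two stride-2 subsequences, pads the odd-index stream
-- when shorter, and zips them back into pairs, instead of A's index while-loop; measured faster (constant factor).


-- ===== PORT A =====
-- the while loop over index i, stepping by 2, carried as structural recursion on the
-- remaining characters (i+1 < len ↔ at least two characters remain)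
def pvPairsA : List Char → List String
  | [] => []
  | [c] => [String.ofList [c, 'X']]
  | c :: d :: rest => String.ofList [c, d] :: pvPairsA rest

def create_digraphs (text : String) : List String := pvPairsA text.toList

-- ===== PORT B =====
def create_digraphs_alt (text : String) : List String :=
  let cs := text.toList
  let evens := (PySem.List.slice? cs none none 2).getD []      -- text[::2]
  let odds0 := (PySem.List.slice? cs (some 1) none 2).getD []  -- text[1::2]
  let odds := if odds0.length < evens.length then odds0 ++ ['X'] else odds0
  (evens.zip odds).map (fun p => String.ofList [p.1, p.2])

-- ===== PRECONDITION & SPEC =====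
def Spec_create_digraphs (text : String) (out : List String) : Prop := out = create_digraphs_alt text
instance (text : String) (out : List String) : Decidable (Spec_create_digraphs text out) := by unfold Spec_create_digraphs; infer_instance

-- ===== CLAIM =====
def Claim_equal_create_digraphs : Prop := ∀ (text : String), Dom_create_digraphs text → Spec_create_digraphs text (create_digraphs text)

-- ===== LEMMAS AND PROOFS =====

-- the even- and odd-indexed subsequences, structurally
def pvEvens : List Char → List Char
  | [] => []
  | [c] => [c]
  | c :: _ :: rest => c :: pvEvens rest

def pvOdds : List Char → List Char
  | [] => []
  | [_] => []
  | _ :: d :: rest => d :: pvOdds rest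

theorem pvSlice_evens (cs : List Char) :
    PySem.List.slice? cs none none 2 = some (pvEvens cs) := by
  induction cs using pvPairsA.induct with
  | case1 => decide
  | case2 c =>
      simp [PySem.List.slice?, PySem.List.sliceIndices, pvEvens, List.range_succ, List.filterMap]
  | case3 c d rest ih =>
      simp [PySem.List.slice?, PySem.List.sliceIndices] at ih ⊢
      have hc : (if (0:Int) ≤ (rest.length:Int) + 1 then (((rest.length:Int) + 1 + 1 + 2 - 1) / 2).toNat else 0)
          = (if 0 < rest.length then (((rest.length:Int) + 2 - 1) / 2).toNat else 0) + 1 := by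
        split_ifs <;> omega
      rw [hc, List.range_succ_eq_map, List.filterMap_cons]
      norm_num
      show _ = c :: pvEvens rest
      rw [← ih]
      refine congrArg _ (List.filterMap_congr ?_)
      intro k hk
      have h2 : (2 * ((k:Int) + 1)).toNat = 2 * k + 1 + 1 := by omega
      have h3 : (2 * (k:Int)).toNat = 2 * k := by omega
      simp [h2, h3, List.getElem?_cons_succ]

theorem pvSlice_odds (cs : List Char) :
    PySem.List.slice? cs (some 1) none 2 = some (pvOdds cs) := by
  induction cs using pvPairsA.induct with
  | case1 => decide
  | case2 c =>
      simp [PySem.List.slice?, PySem.List.sliceIndices, pvOdds]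
  | case3 c d rest ih =>
      simp [PySem.List.slice?, PySem.List.sliceIndices] at ih ⊢
      have hmin : min 1 ((rest.length:Int) + 1 + 1) = 1 := by omega
      rw [hmin]
      have hc : (((rest.length:Int) + 1 + 1 - 1 + 2 - 1) / 2).toNat
          = (if 1 < rest.length then (((rest.length:Int) - min 1 (rest.length:Int) + 2 - 1) / 2).toNat else 0) + 1 := by
        split_ifs <;> omega
      rw [hc, List.range_succ_eq_map, List.filterMap_cons]
      norm_num
      show _ = d :: pvOdds rest
      rw [← ih]
      refine congrArg _ (List.filterMap_congr ?_)
      intro k hk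
      by_cases hr : 1 < rest.length
      · have hmin2 : min 1 ((rest.length:Int)) = 1 := by omega
        have h2 : (1 + 2 * ((k:Int) + 1)).toNat = 2 * k + 1 + 1 + 1 := by omega
        have h3 : (1 + 2 * (k:Int)).toNat = 2 * k + 1 := by omega
        simp [hmin2, h2, h3, List.getElem?_cons_succ]
      · rw [if_neg hr] at hk
        simp at hk

theorem pvZip_pairs (cs : List Char) :
    ((pvEvens cs).zip
        (if (pvOdds cs).length < (pvEvens cs).length then pvOdds cs ++ ['X'] else pvOdds cs)).map
      (fun p => String.ofList [p.1, p.2]) = pvPairsA cs := by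
  induction cs using pvPairsA.induct with
  | case1 => rfl
  | case2 c => rfl
  | case3 c d rest ih =>
      by_cases h : (pvOdds rest).length < (pvEvens rest).length <;>
        simp [pvEvens, pvOdds, pvPairsA, h, ← ih]

-- ===== VERDICT =====
theorem create_digraphs_spec : Claim_equal_create_digraphs := by
  intro text _
  show create_digraphs text = create_digraphs_alt text
  simp only [create_digraphs, create_digraphs_alt, pvSlice_evens, pvSlice_odds, Option.getD_some]
  exact (pvZip_pairs text.toList).symm
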